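-- pv_equiv track=rewrite | github.com/powAu3/interview-assistant | backend/services/kb/loaders/markdown.py | _format_section_path
-- ===== SOURCE A (Python) =====
-- from typing import Optional
--
-- def _format_section_path(title: Optional[str], stack: list[tuple[int, str]]) -> str:
--     parts: list[str] = []
--     if title:
--         parts.append(title)
--     for _, h in stack:
--         if h and (not parts or parts[-1] != h):
--             parts.append(h)
--     return " > ".join(parts)
-- ===== SOURCE B (Python) =====
-- from typing import Optional
--
-- def _format_section_path(title: Optional[str], stack: list[tuple[int, str]]) -> str:
--     heads = [h for _, h in stack]
--
--     def prev_nonempty(i: int) -> Optional[str]: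
--         # the nearest non-empty heading strictly left of position i, else the title
--         for j in range(i - 1, -1, -1):
--             if heads[j]:
--                 return heads[j]
--         return title if title else None
--
--     prefix = [title] if title else []
--     kept = [h for i, h in enumerate(heads) if h and h != prev_nonempty(i)]
--     return " > ".join(prefix + kept)
-- ===== Notes on version B (the rewrite author's own statement) =====
-- stated objective: alternative
-- what changed: Replaces A's stateful accumulator loop (append-and-compare-with-parts[-1]) by a stateless per-element rule: each heading is kept iff it is non-empty and differs from the nearest non-empty heading to its left (or the title), found by an independent backward scan, then one join.
import Mathlib
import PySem

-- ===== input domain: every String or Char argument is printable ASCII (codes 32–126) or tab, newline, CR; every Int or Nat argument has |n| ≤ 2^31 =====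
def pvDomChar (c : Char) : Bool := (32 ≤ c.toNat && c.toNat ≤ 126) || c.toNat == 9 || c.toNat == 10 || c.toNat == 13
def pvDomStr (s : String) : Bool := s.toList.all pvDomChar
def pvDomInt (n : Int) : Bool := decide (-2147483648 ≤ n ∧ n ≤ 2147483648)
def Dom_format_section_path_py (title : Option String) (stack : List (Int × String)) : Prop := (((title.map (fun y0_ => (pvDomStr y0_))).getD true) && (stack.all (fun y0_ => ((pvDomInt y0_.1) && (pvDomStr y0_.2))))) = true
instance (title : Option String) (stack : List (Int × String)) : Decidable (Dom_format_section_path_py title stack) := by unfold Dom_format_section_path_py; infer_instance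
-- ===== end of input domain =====

-- B replaces A's stateful accumulator loop by a stateless per-element rule: keep a heading
-- iff it is non-empty and differs from the nearest non-empty heading to its left (or the
-- title), found by an independent backward scan (alternative decomposition; can be O(n^2)).


-- ===== PORT A =====
-- parts[-1] is ported with PySem.List.pyGet? parts (-1); Python's short-circuit 'not parts or …'
-- becomes the disjunction.
def format_section_path_py (title : Option String) (stack : List (Int × String)) : String :=
  let parts0 : List String := match title with
    | some t => if t ≠ "" then [t] else []
    | none => []
  let parts := stack.foldl
    (fun parts hp =>
      if hp.2 ≠ "" ∧ (parts = [] ∨ PySem.List.pyGet? parts (-1) ≠ some hp.2)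
      then parts ++ [hp.2] else parts)
    parts0
  PySem.Str.join " > " parts

-- ===== PORT B =====
-- prev_nonempty(i): backward scan j = i-1, i-2, …, 0 for the first non-empty heads[j],
-- else the truthy title (ported as structural recursion on i; heads[j] is in range, so
-- List.getD is exact). Python's enumerate is ported with List.zipIdx (element, index).
def pvPrevNE (title : Option String) (heads : List String) : Nat → Option String
  | 0 => match title with
    | some t => if t ≠ "" then some t else none
    | none => none
  | Nat.succ j => if heads.getD j "" ≠ "" then some (heads.getD j "") else pvPrevNE title heads j

def format_section_path_py_alt (title : Option String) (stack : List (Int × String)) : String :=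
  let heads : List String := stack.map Prod.snd
  let pre : List String := match title with
    | some t => if t ≠ "" then [t] else []
    | none => []
  let kept : List String :=
    ((heads.zipIdx).filter (fun p => p.1 != "" && (pvPrevNE title heads p.2 != some p.1))).map Prod.fst
  PySem.Str.join " > " (pre ++ kept)

-- ===== PRECONDITION & SPEC =====
def Spec_format_section_path_py (title : Option String) (stack : List (Int × String)) (out : String) : Prop := out = format_section_path_py_alt title stack
instance (title : Option String) (stack : List (Int × String)) (out : String) : Decidable (Spec_format_section_path_py title stack out) := by unfold Spec_format_section_path_py; infer_instance

-- ===== CLAIM (what is proved, stated in full; the proofs are below) =====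
def Claim_equal_format_section_path_py : Prop := ∀ (title : Option String) (stack : List (Int × String)), Dom_format_section_path_py title stack → Spec_format_section_path_py title stack (format_section_path_py title stack)

-- ===== LEMMAS AND PROOFS =====

-- proof-only abbreviations for A's loop step and the initial parts list
def pvStep (parts : List String) (h : String) : List String :=
  if h ≠ "" ∧ (parts = [] ∨ PySem.List.pyGet? parts (-1) ≠ some h) then parts ++ [h] else parts

def pvP0 (title : Option String) : List String :=
  match title with
  | some t => if t ≠ "" then [t] else []
  | none => []

theorem pvStep_eq (parts : List String) (x : String) :
    pvStep parts x
      = if x ≠ "" ∧ (parts = [] ∨ PySem.List.pyGet? parts (-1) ≠ some x)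
        then parts ++ [x] else parts := rfl

-- pvPrevNE only looks at indices < i, so a right extension of heads is invisible
theorem pvPrevNE_append (title : Option String) (l : List String) (x : String) :
    ∀ i, i ≤ l.length → pvPrevNE title (l ++ [x]) i = pvPrevNE title l i := by
  intro i
  induction i with
  | zero => intro _; rfl
  | succ j ih =>
    intro hj
    have hjl : j < l.length := by omega
    have : (l ++ [x]).getD j "" = l.getD j "" := by
      simp [List.getD, List.getElem?_append_left hjl]
    simp only [pvPrevNE, this]
    split_ifs with h
    · rfl
    · exact ih (by omega)

theorem pvGetD_append_last (l : List String) (x : String) : (l ++ [x]).getD l.length "" = x := by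
  simp [List.getD]

theorem pvPrevNE_last (title : Option String) (l : List String) (x : String) (hx : x ≠ "") :
    pvPrevNE title (l ++ [x]) (l ++ [x]).length = some x := by
  have hlen : (l ++ [x]).length = l.length + 1 := by simp
  rw [hlen]
  simp only [pvPrevNE, pvGetD_append_last]
  rw [if_pos hx]

-- the joint loop invariant: A's fold over heads equals prefix ++ B's kept list,
-- and its last element is exactly pvPrevNE at the end of the list
theorem pvFold_invariant (title : Option String) (heads : List String) :
    heads.foldl pvStep (pvP0 title)
      = pvP0 title
        ++ ((heads.zipIdx).filter (fun p => p.1 != "" && (pvPrevNE title heads p.2 != some p.1))).map Prod.fst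
    ∧ (heads.foldl pvStep (pvP0 title)).getLast? = pvPrevNE title heads heads.length := by
  induction heads using List.reverseRecOn with
  | nil =>
    constructor
    · simp
    · cases title with
      | none => rfl
      | some t =>
        by_cases ht : t = "" <;> simp [pvP0, pvPrevNE, ht]
  | append_singleton l x ih =>
    obtain ⟨ihP, ihL⟩ := ih
    have hfold : (l ++ [x]).foldl pvStep (pvP0 title) = pvStep (l.foldl pvStep (pvP0 title)) x := by
      simp [List.foldl_append]
    have hstab : pvPrevNE title (l ++ [x]) l.length = pvPrevNE title l l.length :=
      pvPrevNE_append title l x l.length le_rfl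
    -- the filter over l ++ [x] splits into the filter over l plus an optional last element
    have hfilter : ((l ++ [x]).zipIdx).filter
          (fun p => p.1 != "" && (pvPrevNE title (l ++ [x]) p.2 != some p.1))
        = (l.zipIdx).filter (fun p => p.1 != "" && (pvPrevNE title l p.2 != some p.1))
          ++ (if x != "" && (pvPrevNE title l l.length != some x) then [(x, l.length)] else []) := by
      rw [List.zipIdx_append, List.filter_append]
      congr 1
      · apply List.filter_congr
        intro p hp
        have hlt : p.2 < l.length := by
          rcases List.mem_zipIdx hp with ⟨h1, h2⟩
          omega
        rw [pvPrevNE_append title l x p.2 (by omega)]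
      · simp only [Nat.zero_add, List.zipIdx]
        rw [List.filter_singleton]
        simp only [hstab, Bool.cond_eq_ite]
    have hlast1 : PySem.List.pyGet? (l.foldl pvStep (pvP0 title)) (-1)
        = (l.foldl pvStep (pvP0 title)).getLast? := PySem.List.pyGet?_neg_one _
    by_cases hx : x = ""
    · -- x empty: nothing appended, pvPrevNE unchanged
      have hfx : pvStep (l.foldl pvStep (pvP0 title)) x = l.foldl pvStep (pvP0 title) := by
        rw [pvStep_eq, if_neg]; rintro ⟨h1, -⟩; exact h1 hx
      have hprev : pvPrevNE title (l ++ [x]) (l ++ [x]).length = pvPrevNE title l l.length := by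
        have hlen : (l ++ [x]).length = l.length + 1 := by simp
        rw [hlen]
        simp only [pvPrevNE, pvGetD_append_last]
        rw [if_neg (by simp [hx])]
        exact hstab
      refine ⟨?_, ?_⟩
      · rw [hfold, hfx, hfilter, ihP]
        simp [hx]
      · rw [hfold, hfx, ihL, hprev]
    · by_cases hne : pvPrevNE title l l.length = some x
      · -- x equals the previous non-empty heading: skipped, last stays some x
        have hfx : pvStep (l.foldl pvStep (pvP0 title)) x = l.foldl pvStep (pvP0 title) := by
          rw [pvStep_eq, if_neg]
          rintro ⟨-, h2⟩
          rcases h2 with h2 | h2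
          · rw [h2] at ihL; simp at ihL; rw [← ihL] at hne; simp at hne
          · rw [hlast1, ihL] at h2; exact h2 hne
        refine ⟨?_, ?_⟩
        · rw [hfold, hfx, hfilter, ihP]
          simp [hne]
        · rw [hfold, hfx, ihL, hne, pvPrevNE_last title l x hx]
      · -- appended
        have hfx : pvStep (l.foldl pvStep (pvP0 title)) x
            = l.foldl pvStep (pvP0 title) ++ [x] := by
          rw [pvStep_eq, if_pos]
          refine ⟨hx, Or.inr ?_⟩
          rw [hlast1, ihL]
          intro h; exact hne h
        refine ⟨?_, ?_⟩
        · rw [hfold, hfx, hfilter, ihP]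
          simp [hx, hne]
        · rw [hfold, hfx, pvPrevNE_last title l x hx]
          simp

-- ===== VERDICT (by name: the statement is the Claim_ definition above) =====
theorem format_section_path_py_spec : Claim_equal_format_section_path_py := by
  intro title stack _
  show format_section_path_py title stack = format_section_path_py_alt title stack
  have h := (pvFold_invariant title (stack.map Prod.snd)).1
  rw [List.foldl_map] at h
  unfold format_section_path_py format_section_path_py_alt
  simp only
  exact congrArg (PySem.Str.join " > ") h
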